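-- pv_equiv track=rewrite | github.com/JLDEMIGUEL/Topologia | ComplejosSimpliciales/src/utils/vietoris_complex_utils.py | all_faces
-- ===== SOURCE A (Python) =====
-- def all_faces(combinations: set, points: tuple) -> set:
--     """
--     Args:
--         combinations (set): set with early faces
--         points (tuple): coordinates of every face
--
--     Returns:
--         Set: combinations set
--     """
--     for i in range(len(points)):
--         face2 = tuple(j for j in points if i != j)
--         sizePrev = len(combinations)
--         combinations.add(face2)
--         if len(combinations) == sizePrev:
--             return combinations
--         all_faces(combinations, face2)
--     return combinations
-- ===== SOURCE B (Python) =====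
-- def all_faces(combinations: set, points: tuple) -> set:
--     """Iterative DFS with an explicit stack of (points, next_index) frames
--     instead of recursion; same pruned face set, same in-place mutation."""
--     stack = [(points, 0)]
--     while stack:
--         pts, i = stack.pop()
--         if i >= len(pts):
--             continue
--         face2 = tuple(j for j in pts if i != j)
--         if face2 in combinations:
--             continue  # the recursive version returns from this frame here
--         combinations.add(face2)
--         stack.append((pts, i + 1))
--         stack.append((face2, 0))
--     return combinations
-- ===== Notes on version B (the rewrite author's own statement) =====
-- stated objective: alternative
-- what changed: Replaces A's recursion (with a mid-loop early return) by an iterative depth-first traversal over an explicit stack of (points, next_index) frames sharing the one mutable combinations set; discarding a frame emulates the early return and the push order reproduces A's exact insertion order.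
import Mathlib
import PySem

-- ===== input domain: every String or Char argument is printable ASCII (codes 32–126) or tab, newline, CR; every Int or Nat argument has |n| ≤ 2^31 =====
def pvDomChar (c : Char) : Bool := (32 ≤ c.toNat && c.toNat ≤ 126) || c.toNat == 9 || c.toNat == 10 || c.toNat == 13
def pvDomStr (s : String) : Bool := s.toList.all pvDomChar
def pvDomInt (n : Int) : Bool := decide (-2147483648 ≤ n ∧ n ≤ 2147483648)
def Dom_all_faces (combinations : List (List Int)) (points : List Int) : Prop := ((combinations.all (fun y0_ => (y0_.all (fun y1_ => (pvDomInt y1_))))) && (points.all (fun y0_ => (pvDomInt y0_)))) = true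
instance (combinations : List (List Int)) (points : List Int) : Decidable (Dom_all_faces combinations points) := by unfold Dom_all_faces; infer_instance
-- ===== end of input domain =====

-- B replaces A's recursion by an iterative DFS over an explicit stack of (points, next_index)
-- frames (objective: alternative decomposition); equivalence is about the RETURN value only
-- (the Python A and B both mutate the `combinations` set in place, in the same way).
-- Both ports carry a fuel argument as a totality guard; the wrapper fuels are proved sufficient.

-- face2 = tuple(j for j in points if i != j)  (both Pythons compute this same tuple)
def pvFace (pts : List Int) (i : Nat) : List Int := pts.filter (fun j => (i : Int) != j)

-- number of sublists of `pts` not yet present in `c`: both totality bounds build on it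
def pvMu (c : List (List Int)) (pts : List Int) : Nat :=
  (pts.sublists.toFinset.filter (fun s => s ∉ c)).card

-- ===== PORT A =====
def afLoopF (fuel : Nat) (c : List (List Int)) (pts : List Int) (i : Nat) : List (List Int) :=
  match fuel with
  | 0 => c  -- dead branch: the wrapper fuel is proved sufficient (pvSim/all_faces_spec)
  | fuel + 1 =>
    -- for i in range(len(points)):
    if i < pts.length then
      -- sizePrev = len(combinations); combinations.add(face2);
      -- if len(combinations) == sizePrev: return combinations
      if (PySem.Set.add c (pvFace pts i)).length = c.length then
        PySem.Set.add c (pvFace pts i)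
      else
        -- all_faces(combinations, face2), then continue the loop at i+1
        afLoopF fuel (afLoopF fuel (PySem.Set.add c (pvFace pts i)) (pvFace pts i) 0) pts (i + 1)
    else c

def all_faces (combinations : List (List Int)) (points : List Int) : List (List Int) :=
  afLoopF (pvMu combinations points + 1) combinations points 0

-- ===== PORT B =====
-- per-frame potential and whole-stack potential: totality bound for the DFS loop
def pvPhi (c : List (List Int)) (pts : List Int) (i : Nat) : Nat :=
  (2 * pts.length + 2) ^ (pvMu c pts) * (pts.length + 1 - i) + 1

def pvW (c : List (List Int)) (stack : List (List Int × Nat)) : Nat :=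
  (stack.map (fun fr => pvPhi c fr.1 fr.2)).sum

def bRunF (fuel : Nat) (c : List (List Int)) (stack : List (List Int × Nat)) : List (List Int) :=
  match fuel with
  | 0 => c  -- dead branch: the wrapper fuel is proved sufficient (bRunF_irrel/all_faces_spec)
  | fuel + 1 =>
    match stack with
    | [] => c
    | (pts, i) :: rest =>
      if i < pts.length then
        if pvFace pts i ∈ c then
          bRunF fuel c rest  -- the recursive version returns from this frame here
        else
          bRunF fuel (c ++ [pvFace pts i]) ((pvFace pts i, 0) :: (pts, i + 1) :: rest)
      else
        bRunF fuel c rest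

def all_faces_alt (combinations : List (List Int)) (points : List Int) : List (List Int) :=
  bRunF (pvW combinations [(points, 0)] + 1) combinations [(points, 0)]

-- ===== PRECONDITION & SPEC =====
def Spec_all_faces (combinations : List (List Int)) (points : List Int) (out : List (List Int)) : Prop := out = all_faces_alt combinations points
instance (combinations : List (List Int)) (points : List Int) (out : List (List Int)) : Decidable (Spec_all_faces combinations points out) := by unfold Spec_all_faces; infer_instance

-- ===== CLAIM (what is proved, stated in full; the proofs are below) =====
def Claim_equal_all_faces : Prop := ∀ (combinations : List (List Int)) (points : List Int), Dom_all_faces combinations points → Spec_all_faces combinations points (all_faces combinations points)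

-- ===== LEMMAS AND PROOFS =====

theorem pvFace_sublist (pts : List Int) (i : Nat) : (pvFace pts i).Sublist pts := by
  unfold pvFace; exact List.filter_sublist

theorem pvMu_lt {c c' : List (List Int)} {pts q f : List Int}
    (hsub : ∀ x ∈ c, x ∈ c') (hq : q.Sublist pts) (hf : f.Sublist pts)
    (hfc : f ∉ c) (hfc' : f ∈ c') : pvMu c' q < pvMu c pts := by
  apply Finset.card_lt_card
  constructor
  · intro s hs
    simp only [Finset.mem_filter, List.mem_toFinset, List.mem_sublists] at hs ⊢
    exact ⟨hs.1.trans hq, fun hc => hs.2 (hsub s hc)⟩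
  · intro habs
    have hf1 : f ∈ pts.sublists.toFinset.filter (fun s => s ∉ c) := by
      simp only [Finset.mem_filter, List.mem_toFinset, List.mem_sublists]
      exact ⟨hf, hfc⟩
    have := habs hf1
    simp only [Finset.mem_filter, List.mem_toFinset] at this
    exact this.2 hfc'

theorem pvMu_mono {c c' : List (List Int)} (q : List Int)
    (h : ∀ x ∈ c, x ∈ c') : pvMu c' q ≤ pvMu c q := by
  apply Finset.card_le_card
  intro s hs
  simp only [Finset.mem_filter, List.mem_toFinset] at hs ⊢
  exact ⟨hs.1, fun hc => hs.2 (h s hc)⟩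

theorem pvAdd_len_iff (c : List (List Int)) (f : List Int) :
    (PySem.Set.add c f).length = c.length ↔ f ∈ c := by
  by_cases hm : f ∈ c
  · rw [PySem.Set.add_of_mem hm]; simp [hm]
  · rw [PySem.Set.add_of_not_mem hm]; simp [hm]

-- the A-side result only grows the set
theorem afLoopF_sup : ∀ (n : Nat) (c : List (List Int)) (pts : List Int) (i : Nat),
    ∀ x ∈ c, x ∈ afLoopF n c pts i := by
  intro n
  induction n with
  | zero => intro c pts i x hx; exact hx
  | succ n ih =>
    intro c pts i x hx
    rw [afLoopF]
    by_cases h : i < pts.length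
    · by_cases hmem : pvFace pts i ∈ c
      · rw [if_pos h, if_pos ((pvAdd_len_iff c (pvFace pts i)).mpr hmem),
          PySem.Set.add_of_mem hmem]
        exact hx
      · rw [if_pos h, if_neg (fun hl => hmem ((pvAdd_len_iff c (pvFace pts i)).mp hl))]
        refine ih _ pts (i + 1) x (ih _ (pvFace pts i) 0 x ?_)
        rw [PySem.Set.add_of_not_mem hmem]
        exact List.mem_append_left _ hx
    · rw [if_neg h]
      exact hx

theorem pvPhi_pos (c : List (List Int)) (pts : List Int) (i : Nat) : 1 ≤ pvPhi c pts i :=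
  Nat.succ_le_succ (Nat.zero_le _)

theorem pvW_cons (c : List (List Int)) (fr : List Int × Nat) (st : List (List Int × Nat)) :
    pvW c (fr :: st) = pvPhi c fr.1 fr.2 + pvW c st := by
  simp [pvW]

theorem pvW_mono {c c' : List (List Int)} (st : List (List Int × Nat))
    (h : ∀ x ∈ c, x ∈ c') : pvW c' st ≤ pvW c st := by
  induction st with
  | nil => simp [pvW]
  | cons a t ih =>
    rw [pvW_cons, pvW_cons]
    have hphi : pvPhi c' a.1 a.2 ≤ pvPhi c a.1 a.2 := by
      unfold pvPhi
      exact Nat.add_le_add_right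
        (Nat.mul_le_mul_right _ (Nat.pow_le_pow_right (by omega) (pvMu_mono a.1 h))) 1
    omega

-- the key arithmetic: pushing the two new frames after adding a new face shrinks the potential
theorem pvW_push_lt {c : List (List Int)} {pts f : List Int} {i : Nat}
    (rest : List (List Int × Nat)) (hi : i < pts.length)
    (hf : f.Sublist pts) (hfc : f ∉ c) :
    pvW (c ++ [f]) ((f, 0) :: (pts, i + 1) :: rest) < pvW c ((pts, i) :: rest) := by
  have hsub : ∀ x ∈ c, x ∈ c ++ [f] := fun x hx => by simp [hx]
  have hWr : pvW (c ++ [f]) rest ≤ pvW c rest := pvW_mono rest hsub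
  have hmu1 : pvMu (c ++ [f]) f < pvMu c pts := pvMu_lt hsub hf hf hfc (by simp)
  have hmu2 : pvMu (c ++ [f]) pts < pvMu c pts :=
    pvMu_lt hsub (List.Sublist.refl pts) hf hfc (by simp)
  have hmupos : 1 ≤ pvMu c pts := by omega
  obtain ⟨m, hm⟩ := Nat.exists_eq_add_of_le hmupos
  have hLf : f.length ≤ pts.length := hf.length_le
  set L := pts.length with hL
  set P := (2 * L + 2) ^ m with hP
  have hP1 : 1 ≤ P := Nat.one_le_pow _ _ (by omega)
  have hXm : (2 * L + 2) ^ (pvMu c pts) = P * (2 * L + 2) := by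
    rw [hm, add_comm 1 m, pow_succ]
  have h1 : (2 * f.length + 2) ^ (pvMu (c ++ [f]) f) ≤ P := by
    calc (2 * f.length + 2) ^ (pvMu (c ++ [f]) f)
        ≤ (2 * L + 2) ^ (pvMu (c ++ [f]) f) := Nat.pow_le_pow_left (by omega) _
      _ ≤ P := Nat.pow_le_pow_right (by omega) (by omega)
  have h2 : (2 * L + 2) ^ (pvMu (c ++ [f]) pts) ≤ P :=
    Nat.pow_le_pow_right (by omega) (by omega)
  have e1 : pvPhi (c ++ [f]) f 0 ≤ P * (L + 1) + 1 := by
    have h3 := Nat.mul_le_mul h1 (show f.length + 1 - 0 ≤ L + 1 by omega)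
    unfold pvPhi
    omega
  have e2 : pvPhi (c ++ [f]) pts (i + 1) ≤ P * L + 1 := by
    have h3 := Nat.mul_le_mul h2 (show L + 1 - (i + 1) ≤ L by omega)
    unfold pvPhi
    rw [← hL]
    omega
  have e3 : P * (2 * L + 2) * 2 + 1 ≤ pvPhi c pts i := by
    have h3 : P * (2 * L + 2) * 2 ≤ (2 * L + 2) ^ (pvMu c pts) * (L + 1 - i) := by
      rw [hXm]
      exact Nat.mul_le_mul_left _ (by omega)
    unfold pvPhi
    rw [← hL]
    omega
  have hPL : P * (L + 1) + P * L + 3 ≤ P * (2 * L + 2) * 2 := by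
    have h4 : P * (L + 1) + P * L + P * (2 * L + 3) = P * (2 * L + 2) * 2 := by ring
    have hpos : 1 * (2 * L + 3) ≤ P * (2 * L + 3) := Nat.mul_le_mul_right _ hP1
    omega
  rw [pvW_cons, pvW_cons, pvW_cons]
  dsimp only
  omega

theorem bRunF_nil (fuel : Nat) (c : List (List Int)) : bRunF fuel c [] = c := by
  cases fuel <;> rfl

-- any two sufficient fuels give the same machine result
theorem bRunF_irrel : ∀ (n fa fb : Nat) (c : List (List Int)) (stack : List (List Int × Nat)),
    pvW c stack ≤ n → pvW c stack < fa → pvW c stack < fb →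
    bRunF fa c stack = bRunF fb c stack := by
  intro n
  induction n using Nat.strong_induction_on with
  | _ n ih =>
    intro fa fb c stack hn hfa hfb
    obtain ⟨fa', rfl⟩ : ∃ k, fa = k + 1 := ⟨fa - 1, by omega⟩
    obtain ⟨fb', rfl⟩ : ∃ k, fb = k + 1 := ⟨fb - 1, by omega⟩
    match stack, hn, hfa, hfb with
    | [], _, _, _ => rw [bRunF_nil, bRunF_nil]
    | (pts, i) :: rest, hn, hfa, hfb =>
      rw [bRunF, bRunF]
      have hW : pvW c ((pts, i) :: rest) = pvPhi c pts i + pvW c rest := pvW_cons c _ rest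
      have hphi := pvPhi_pos c pts i
      by_cases h : i < pts.length
      · by_cases hmem : pvFace pts i ∈ c
        · rw [if_pos h, if_pos h, if_pos hmem, if_pos hmem]
          exact ih (n - 1) (by omega) fa' fb' c rest (by omega) (by omega) (by omega)
        · rw [if_pos h, if_pos h, if_neg hmem, if_neg hmem]
          have hlt := pvW_push_lt rest h (pvFace_sublist pts i) hmem
          have hn1 : 1 ≤ pvW c ((pts, i) :: rest) := by omega
          exact ih (n - 1) (by omega) fa' fb' _ _ (by omega) (by omega) (by omega)
      · rw [if_neg h, if_neg h]
        exact ih (n - 1) (by omega) fa' fb' c rest (by omega) (by omega) (by omega)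

-- simulation: the machine with frame (pts,i) on top behaves like A's recursive call
-- all_faces(c, pts) resumed at index i, followed by the machine on the remaining stack
theorem pvSim : ∀ (n : Nat) (c : List (List Int)) (pts : List Int) (i : Nat)
    (rest : List (List Int × Nat)) (fa fb : Nat),
    pvMu c pts ≤ n → pvMu c pts < fa → pvW c ((pts, i) :: rest) < fb →
    bRunF fb c ((pts, i) :: rest) = bRunF fb (afLoopF fa c pts i) rest := by
  intro n
  induction n using Nat.strong_induction_on with
  | _ n ih =>
    intro c pts i rest fa fb hn hfa hfb
    obtain ⟨fa', rfl⟩ : ∃ k, fa = k + 1 := ⟨fa - 1, by omega⟩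
    obtain ⟨fb', rfl⟩ : ∃ k, fb = k + 1 := ⟨fb - 1, by omega⟩
    have hW : pvW c ((pts, i) :: rest) = pvPhi c pts i + pvW c rest := pvW_cons c _ rest
    have hphi := pvPhi_pos c pts i
    by_cases h : i < pts.length
    · by_cases hmem : pvFace pts i ∈ c
      · rw [bRunF, if_pos h, if_pos hmem, afLoopF,
          if_pos h, if_pos ((pvAdd_len_iff c (pvFace pts i)).mpr hmem),
          PySem.Set.add_of_mem hmem]
        exact bRunF_irrel (pvW c rest) fb' (fb' + 1) c rest le_rfl (by omega) (by omega)
      · have hlen := fun hl => hmem ((pvAdd_len_iff c (pvFace pts i)).mp hl)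
        rw [bRunF, if_pos h, if_neg hmem, afLoopF, if_pos h, if_neg hlen]
        have hc2 : PySem.Set.add c (pvFace pts i) = c ++ [pvFace pts i] :=
          PySem.Set.add_of_not_mem hmem
        have hsub : ∀ x ∈ c, x ∈ c ++ [pvFace pts i] :=
          fun x hx => List.mem_append_left _ hx
        have hfmem : pvFace pts i ∈ c ++ [pvFace pts i] :=
          List.mem_append_right _ (by simp)
        have hmu1 : pvMu (c ++ [pvFace pts i]) (pvFace pts i) < pvMu c pts :=
          pvMu_lt hsub (pvFace_sublist pts i) (pvFace_sublist pts i) hmem hfmem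
        have hn1 : 1 ≤ pvMu c pts := by omega
        have hpush := pvW_push_lt rest h (pvFace_sublist pts i) hmem
        -- machine: process the child frame (face2, 0) first
        rw [ih (n - 1) (by omega) (c ++ [pvFace pts i]) (pvFace pts i) 0
          ((pts, i + 1) :: rest) fa' fb' (by omega) (by omega) (by omega)]
        -- A side: the same inner recursive call
        rw [hc2]
        set r := afLoopF fa' (c ++ [pvFace pts i]) (pvFace pts i) 0 with hr
        have hrsup : ∀ x ∈ c ++ [pvFace pts i], x ∈ r := fun x hx =>
          afLoopF_sup fa' _ _ 0 x hx
        have hmu2 : pvMu r pts < pvMu c pts :=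
          pvMu_lt (fun x hx => hrsup x (hsub x hx)) (List.Sublist.refl pts)
            (pvFace_sublist pts i) hmem (hrsup _ hfmem)
        -- the parent frame resumes at i+1 with the grown set r
        have hWr : pvW r ((pts, i + 1) :: rest)
            ≤ pvW (c ++ [pvFace pts i]) ((pts, i + 1) :: rest) :=
          pvW_mono _ hrsup
        have hWc2 : pvW (c ++ [pvFace pts i]) ((pts, i + 1) :: rest)
            ≤ pvW (c ++ [pvFace pts i]) ((pvFace pts i, 0) :: (pts, i + 1) :: rest) := by
          rw [pvW_cons (c ++ [pvFace pts i]) (pvFace pts i, 0)]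
          omega
        rw [ih (n - 1) (by omega) r pts (i + 1) rest fa' fb' (by omega) (by omega)
          (by omega)]
        -- both sides now run the machine on `rest` from the same set; align the fuels
        have hsup2 : ∀ x ∈ c, x ∈ afLoopF fa' r pts (i + 1) := fun x hx =>
          afLoopF_sup fa' r pts (i + 1) x (hrsup x (hsub x hx))
        have hWfin : pvW (afLoopF fa' r pts (i + 1)) rest ≤ pvW c rest :=
          pvW_mono rest hsup2
        exact bRunF_irrel (pvW c rest) fb' (fb' + 1) _ rest (by omega) (by omega) (by omega)
    · rw [bRunF, if_neg h, afLoopF, if_neg h]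
      exact bRunF_irrel (pvW c rest) fb' (fb' + 1) c rest le_rfl (by omega) (by omega)

-- ===== VERDICT (by name: the statement is the Claim_ definition above) =====
theorem all_faces_spec : Claim_equal_all_faces := by
  intro combinations points _
  unfold Spec_all_faces all_faces all_faces_alt
  rw [pvSim (pvMu combinations points) combinations points 0 []
    (pvMu combinations points + 1) (pvW combinations [(points, 0)] + 1)
    le_rfl (by omega) (by omega)]
  rw [bRunF_nil]
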